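-- pv_equiv track=rewrite | github.com/kiteB/Algorithm | Programmers/01_Level1/64061.py | solution
-- ===== SOURCE A (Python) =====
-- def solution(board, moves):
--     answer = 0
--     n = len(board)
--     stack_list = [[] * i for i in range(n+1)]
--     basket = []
--
--     for i in range(n):
--         for j in range(n):
--             if board[n-j-1][i] != 0:
--                 stack_list[i+1].append(board[n-j-1][i])
--
--     for move in moves:
--         if len(stack_list[move]):
--             if len(basket) and basket[-1] == stack_list[move][-1]:
--                 answer += 2
--                 basket.pop()
--                 stack_list[move].pop()
--             else:
--                 basket.append(stack_list[move].pop())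
--
--     return answer
-- ===== SOURCE B (Python) =====
-- def solution(board, moves):
--     n = len(board)
--     # moves are 1-based column numbers, so keep a dummy empty column in slot 0
--     cols = [[]] + [[row[c] for row in board] for c in range(n)]
--     ptr = [0] * (n + 1)        # next row to examine in each column, advanced lazily
--     basket = []
--     answer = 0
--     for m in moves:
--         col = cols[m]
--         r = ptr[m]
--         while r < len(col) and col[r] == 0:
--             r += 1
--         if r < len(col):
--             doll = col[r]
--             ptr[m] = r + 1
--             if basket and basket[-1] == doll:
--                 basket.pop()
--                 answer += 2
--             else:
--                 basket.append(doll)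
--         else:
--             ptr[m] = r
--     return answer
-- ===== Notes on version B (the rewrite author's own statement) =====
-- stated objective: alternative
-- what changed: A eagerly builds per-column stacks of the nonzero dolls (nested index loops with bottom-up reversal) and pops from them; B keeps the raw columns of a 1-based column table and consumes them non-destructively with lazy forward row pointers that skip zeros on demand during move processing.
import Mathlib
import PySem

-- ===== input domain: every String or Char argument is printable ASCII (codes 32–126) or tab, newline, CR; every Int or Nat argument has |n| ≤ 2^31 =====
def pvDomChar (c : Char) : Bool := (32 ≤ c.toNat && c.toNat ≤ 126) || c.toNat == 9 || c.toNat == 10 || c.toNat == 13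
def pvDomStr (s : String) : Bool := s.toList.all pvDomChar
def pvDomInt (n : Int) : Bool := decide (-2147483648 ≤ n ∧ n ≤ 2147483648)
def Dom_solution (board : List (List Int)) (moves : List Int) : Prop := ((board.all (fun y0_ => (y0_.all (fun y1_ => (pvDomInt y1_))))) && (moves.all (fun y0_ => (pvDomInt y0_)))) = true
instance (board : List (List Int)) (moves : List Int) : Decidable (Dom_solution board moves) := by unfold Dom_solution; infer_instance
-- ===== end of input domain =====

-- B replaces A's eagerly built per-column stacks (popped destructively) by a 1-based table
-- of the raw columns consumed via lazy forward row pointers that skip zeros on demand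
-- (equal return values; neither version mutates its arguments).

-- ===== PORT A =====
-- builds stack_list: stack_list[i+1] collects column i's nonzero dolls bottom-to-top
def buildStacks (board : List (List Int)) : List (List Int) :=
  let n := board.length
  (List.range n).foldl (fun sl i =>
    (List.range n).foldl (fun sl j =>
      if (board.getD (n - j - 1) []).getD i 0 ≠ 0 then
        sl.set (i+1) (sl.getD (i+1) [] ++ [(board.getD (n - j - 1) []).getD i 0])
      else sl) sl)
    ((List.range (n+1)).map (fun _ => ([] : List Int)))

-- one iteration of A's `for move in moves` loop; state = (answer, stack_list, basket)
def aStep (st : Int × List (List Int) × List Int) (move : Int) : Int × List (List Int) × List Int :=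
  let stk := (PySem.List.pyGet? st.2.1 move).getD []
  if stk.length ≠ 0 then
    if st.2.2.length ≠ 0 ∧ PySem.List.pyGet? st.2.2 (-1) = PySem.List.pyGet? stk (-1) then
      (st.1 + 2, PySem.List.pySetD st.2.1 move stk.dropLast, st.2.2.dropLast)
    else
      (st.1, PySem.List.pySetD st.2.1 move stk.dropLast, st.2.2 ++ [(PySem.List.pyGet? stk (-1)).getD 0])
  else st

def solution (board : List (List Int)) (moves : List Int) : Int :=
  (moves.foldl aStep (0, buildStacks board, [])).1

-- ===== PORT B =====
-- cols = [[]] + [[row[c] for row in board] for c in range(n)]  (row[c] in range under Pre_)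
def bCols (board : List (List Int)) : List (List Int) :=
  [] :: (List.range board.length).map
    (fun (c : Nat) => board.map (fun row => (PySem.List.pyGet? row ((c:Nat):Int)).getD 0))

-- B's `while r < len(col) and col[r] == 0: r += 1` (fuel = len(col) suffices under Pre_)
def bScan (col : List Int) : Int → Nat → Int
  | r, 0 => r
  | r, fuel+1 =>
      if r < (col.length : Int) ∧ (PySem.List.pyGet? col r).getD 0 = 0 then
        bScan col (r+1) fuel else r

-- one iteration of B's move loop; state = (answer, ptr, basket)
def bStep (cols : List (List Int)) (st : Int × List Int × List Int) (m : Int) : Int × List Int × List Int :=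
  let col := (PySem.List.pyGet? cols m).getD []
  let r := bScan col ((PySem.List.pyGet? st.2.1 m).getD 0) col.length
  if r < (col.length : Int) then
    let doll := (PySem.List.pyGet? col r).getD 0
    let ptr' := PySem.List.pySetD st.2.1 m (r+1)
    if st.2.2.length ≠ 0 ∧ PySem.List.pyGet? st.2.2 (-1) = some doll then
      (st.1 + 2, ptr', st.2.2.dropLast)
    else (st.1, ptr', st.2.2 ++ [doll])
  else (st.1, PySem.List.pySetD st.2.1 m r, st.2.2)

def solution_alt (board : List (List Int)) (moves : List Int) : Int :=
  (moves.foldl (bStep (bCols board)) (0, List.replicate (board.length + 1) (0:Int), [])).1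

-- ===== PRECONDITION & SPEC =====
-- Pre_ is exactly the set of inputs on which the Python A returns normally: it excludes
-- ragged boards whose rows are shorter than len(board) (A raises IndexError in its build
-- pass) and moves outside [-(len(board)+1), len(board)] (A raises IndexError indexing
-- stack_list; inside that range Python's negative indices wrap, which both programs honour).
def Pre_solution (board : List (List Int)) (moves : List Int) : Prop :=
  (∀ row ∈ board, board.length ≤ row.length) ∧
  (∀ m ∈ moves, -((board.length : Int)+1) ≤ m ∧ m ≤ (board.length : Int))
instance (board : List (List Int)) (moves : List Int) : Decidable (Pre_solution board moves) := by
  unfold Pre_solution; infer_instance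

def pvWitness_solution : List (List Int) × List Int := ([[1, 0], [2, 3]], [1, 2, 2])

def Spec_solution (board : List (List Int)) (moves : List Int) (out : Int) : Prop := out = solution_alt board moves
instance (board : List (List Int)) (moves : List Int) (out : Int) : Decidable (Spec_solution board moves out) := by unfold Spec_solution; infer_instance

-- ===== CLAIM (what is proved, stated in full; the proofs are below) =====
def Claim_equal_solution : Prop := ∀ (board : List (List Int)) (moves : List Int), Dom_solution board moves → Pre_solution board moves → Spec_solution board moves (solution board moves)

-- ===== LEMMAS AND PROOFS =====

-- column c of the board, as a plain list
def colL (board : List (List Int)) (c : Nat) : List Int :=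
  board.map (fun row => row.getD c 0)

-- the nonzero entries of a column from position t downward
def colNZ (L : List Int) (t : Nat) : List Int :=
  (L.drop t).filter (fun v => v ≠ 0)

lemma getD_set_self {α : Type} (xs : List α) (k : Nat) (v d : α) (h : k < xs.length) :
    (xs.set k v).getD k d = v := by
  simp [List.getD_eq_getElem?_getD, List.getElem?_set_self h]

lemma getD_set_ne {α : Type} (xs : List α) (k j : Nat) (v d : α) (h : k ≠ j) :
    (xs.set k v).getD j d = xs.getD j d := by
  simp [List.getD_eq_getElem?_getD, List.getElem?_set_ne h]

lemma getD_eq_getElem' {α : Type} (xs : List α) (k : Nat) (d : α) (h : k < xs.length) :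
    xs.getD k d = xs[k] := by
  simp [List.getD_eq_getElem?_getD, List.getElem?_eq_getElem h]

lemma colNZ_of_ge (L : List Int) (t : Nat) (h : L.length ≤ t) :
    colNZ L t = [] := by
  simp [colNZ, List.drop_eq_nil_of_le h]

lemma colNZ_step (L : List Int) (t : Nat) (h : t < L.length) :
    colNZ L t = (if L.getD t 0 ≠ 0 then [L.getD t 0] else []) ++ colNZ L (t+1) := by
  unfold colNZ
  rw [List.drop_eq_getElem_cons h, List.filter_cons, getD_eq_getElem' L t 0 h]
  by_cases hz : L[t] = 0
  · simp [hz]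
  · simp [hz]

lemma colL_getD (board : List (List Int)) (c r : Nat) :
    (colL board c).getD r 0 = (board.getD r []).getD c 0 := by
  unfold colL
  rcases Nat.lt_or_ge r board.length with h | h
  · rw [List.getD_eq_getElem?_getD, List.getElem?_map, List.getElem?_eq_getElem h,
      getD_eq_getElem' board r [] h]
    simp [List.getD_eq_getElem?_getD]
  · have hx : (board.map (fun row => row.getD c 0)).getD r 0 = 0 := by
      rw [List.getD_eq_getElem?_getD, List.getElem?_eq_none (by simpa using h)]
      rfl
    have hy : board.getD r [] = [] := by
      rw [List.getD_eq_getElem?_getD, List.getElem?_eq_none (by simpa using h)]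
      rfl
    rw [hx, hy]
    rfl

lemma colL_length (board : List (List Int)) (c : Nat) :
    (colL board c).length = board.length := by simp [colL]

-- the comprehension [row[c] for row in board] computes colL (row[c] ported as pyGet?/getD 0)
lemma bCols_col (board : List (List Int)) (c : Nat) :
    board.map (fun row => (PySem.List.pyGet? row ((c:Nat):Int)).getD 0) = colL board c := by
  apply List.map_congr_left
  intro row _
  rw [PySem.List.pyGet?_natCast, List.getD_eq_getElem?_getD]

-- A's inner loop appends the column's filtered values at slot k
lemma inner_foldl (f : Nat → Int) (L : List Nat) (k : Nat) :
    ∀ sl : List (List Int), k < sl.length →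
      L.foldl (fun sl j =>
          if f j ≠ 0 then sl.set k (sl.getD k [] ++ [f j]) else sl) sl
        = sl.set k (sl.getD k [] ++ (L.map f).filter (fun v => v ≠ 0)) := by
  induction L with
  | nil =>
      intro sl h
      simp only [List.foldl_nil, List.map_nil, List.filter_nil, List.append_nil]
      rw [getD_eq_getElem' sl k [] h, List.set_getElem_self]
  | cons x L ih =>
      intro sl h
      simp only [List.foldl_cons, List.map_cons, List.filter_cons]
      by_cases hx : f x = 0
      · rw [if_neg (by simpa using hx), ih sl h]
        simp [hx]
      · have h' : k < (sl.set k (sl.getD k [] ++ [f x])).length := by simpa using h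
        rw [if_pos hx, ih _ h', getD_set_self _ _ _ _ h, List.set_set]
        simp [hx, List.append_assoc]

lemma map_range_rev (g : Nat → Int) (n : Nat) :
    (List.range n).map (fun j => g (n - 1 - j)) = ((List.range n).map g).reverse := by
  induction n with
  | zero => simp
  | succ n ih =>
      calc (List.range (n+1)).map (fun j => g (n+1-1-j))
          = g n :: (List.range n).map (fun j => g (n-1-j)) := by
            rw [List.range_succ_eq_map]
            simp only [List.map_cons, List.map_map]
            have h0 : n + 1 - 1 - 0 = n := by omega
            rw [h0]
            congr 1
            apply List.map_congr_left
            intro j _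
            simp only [Function.comp]
            congr 1
            omega
        _ = g n :: ((List.range n).map g).reverse := by rw [ih]
        _ = ((List.range (n+1)).map g).reverse := by
            rw [List.range_succ, List.map_append, List.reverse_append]
            simp

lemma map_range_getD (board : List (List Int)) (c : Nat) :
    (List.range board.length).map (fun r => (board.getD r []).getD c 0) = colL board c := by
  apply List.ext_getElem (by simp [colL])
  intro i h1 h2
  have hi : i < board.length := by simpa using h1
  rw [List.getElem_map, List.getElem_range,
    ← getD_eq_getElem' (colL board c) i 0 (by rwa [colL_length]), colL_getD]

lemma col_rev (board : List (List Int)) (c : Nat) :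
    ((List.range board.length).map
        (fun j => (board.getD (board.length - j - 1) []).getD c 0)).filter (fun v => v ≠ 0)
      = (colNZ (colL board c) 0).reverse := by
  have h1 : (List.range board.length).map
      (fun j => (board.getD (board.length - j - 1) []).getD c 0)
      = (List.range board.length).map
        (fun j => (board.getD (board.length - 1 - j) []).getD c 0) := by
    apply List.map_congr_left
    intro j _
    congr 2
    omega
  rw [h1, map_range_rev (fun r => (board.getD r []).getD c 0) board.length,
    map_range_getD, List.filter_reverse]
  unfold colNZ
  simp

lemma outer_aux (board : List (List Int)) : ∀ k : Nat, k ≤ board.length →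
    (List.range k).foldl (fun sl i =>
      (List.range board.length).foldl (fun sl j =>
        if (board.getD (board.length - j - 1) []).getD i 0 ≠ 0 then
          sl.set (i+1) (sl.getD (i+1) [] ++ [(board.getD (board.length - j - 1) []).getD i 0])
        else sl) sl)
      ((List.range (board.length+1)).map (fun _ => ([] : List Int)))
      = [] :: (List.range board.length).map
          (fun c => if c < k then (colNZ (colL board c) 0).reverse else []) := by
  intro k
  induction k with
  | zero =>
      intro _
      rw [List.range_succ_eq_map]
      simp [List.map_map, Function.comp_def]
  | succ k ih =>
      intro hk
      have hkn : k < board.length := hk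
      have hsplit : List.range (k+1) = List.range k ++ [k] := List.range_succ
      rw [hsplit, List.foldl_append, ih (le_of_lt hkn)]
      simp only [List.foldl_cons, List.foldl_nil]
      set Rk := [] :: (List.range board.length).map
          (fun c => if c < k then (colNZ (colL board c) 0).reverse else []) with hRk
      have hlen : k + 1 < Rk.length := by simp [hRk]; omega
      rw [inner_foldl (fun j => (board.getD (board.length - j - 1) []).getD k 0)
            (List.range board.length) (k+1) Rk hlen]
      have hslot : Rk.getD (k+1) [] = [] := by
        simp only [hRk, List.getD_cons_succ]
        rw [List.getD_eq_getElem?_getD]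
        simp [List.getElem?_map, List.getElem?_range hkn]
      rw [hslot, List.nil_append, col_rev]
      simp only [hRk, List.set_cons_succ]
      congr 1
      apply List.ext_getElem (by simp)
      intro i h1 h2
      have hin : i < board.length := by simpa using h1
      rw [List.getElem_set]
      by_cases hik : k = i
      · subst hik
        simp [List.getElem_map, List.getElem_range]
      · simp only [if_neg hik, List.getElem_map, List.getElem_range]
        exact if_congr (by omega) rfl rfl

lemma buildStacks_eq (board : List (List Int)) :
    buildStacks board
      = [] :: (List.range board.length).map (fun c => (colNZ (colL board c) 0).reverse) := by
  simp only [buildStacks]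
  rw [outer_aux board board.length le_rfl]
  congr 1
  apply List.map_congr_left
  intro c hc
  rw [if_pos (List.mem_range.mp hc)]

lemma pyGetD0 (xs : List Int) (t : Nat) :
    (PySem.List.pyGet? xs ((t:Nat):Int)).getD 0 = xs.getD t 0 := by
  rw [PySem.List.pyGet?_natCast, List.getD_eq_getElem?_getD]

lemma scan_spec (L : List Int) :
    ∀ (fuel t : Nat), t ≤ L.length → L.length - t ≤ fuel →
      (colNZ L t = [] → bScan L (t:Int) fuel = (L.length : Int)) ∧
      (∀ d rest, colNZ L t = d :: rest →
        ∃ r' : Nat, r' < L.length ∧ bScan L (t:Int) fuel = (r':Int) ∧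
          L.getD r' 0 = d ∧ colNZ L (r'+1) = rest) := by
  intro fuel
  induction fuel with
  | zero =>
      intro t ht hf
      have htn : t = L.length := by omega
      subst htn
      constructor
      · intro _; rfl
      · intro d rest hcol
        rw [colNZ_of_ge L L.length le_rfl] at hcol
        exact absurd hcol (by simp)
  | succ fuel ih =>
      intro t ht hf
      by_cases hteq : L.length ≤ t
      · have htn : t = L.length := by omega
        subst htn
        constructor
        · intro _
          simp [bScan]
        · intro d rest hcol
          rw [colNZ_of_ge L L.length le_rfl] at hcol
          exact absurd hcol (by simp)
      · have htlt : t < L.length := by omega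
        have hcell := pyGetD0 L t
        rw [colNZ_step L t htlt]
        by_cases hz : L.getD t 0 = 0
        · have hstep : bScan L (t:Int) (fuel+1) = bScan L ((t+1 : Nat):Int) fuel := by
            show (if ((t:Int) < (L.length:Int) ∧ (PySem.List.pyGet? L (t:Int)).getD 0 = 0)
                then _ else _) = _
            rw [if_pos ⟨by exact_mod_cast htlt, by rw [hcell]; exact hz⟩]
            norm_num
          have hih := ih (t+1) (by omega) (by omega)
          simp only [hz, ne_eq, not_true_eq_false, if_false, List.nil_append, hstep]
          exact hih
        · have hstop : bScan L (t:Int) (fuel+1) = (t:Int) := by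
            show (if ((t:Int) < (L.length:Int) ∧ (PySem.List.pyGet? L (t:Int)).getD 0 = 0)
                then _ else _) = _
            rw [if_neg (by rw [hcell]; tauto)]
          rw [if_pos hz]
          constructor
          · intro hcol
            exact absurd hcol (by simp)
          · intro d rest hcol
            rw [List.singleton_append] at hcol
            injection hcol with h1 h2
            exact ⟨t, htlt, hstop, h1, h2⟩

lemma pyGet?_wrapneg {α : Type} (xs : List α) (m : Int) (h1 : -(xs.length:Int) ≤ m)
    (h2 : m < 0) : PySem.List.pyGet? xs m = xs[(m + xs.length).toNat]? := by
  simp only [PySem.List.pyGet?, PySem.List.pyIdx?]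
  rw [if_neg (by omega), if_pos (by omega),
    show xs.length - (-m).toNat = (m + xs.length).toNat from by omega]
  rfl

lemma pySetD_wrapneg {α : Type} (xs : List α) (m : Int) (v : α) (h1 : -(xs.length:Int) ≤ m)
    (h2 : m < 0) : PySem.List.pySetD xs m v = xs.set (m + xs.length).toNat v := by
  simp only [PySem.List.pySetD, PySem.List.pySet?, PySem.List.pyIdx?]
  rw [if_neg (by omega), if_pos (by omega),
    show xs.length - (-m).toNat = (m + xs.length).toNat from by omega]
  rfl

-- the slot index: Python's xs[m] on a list of length L, for -L ≤ m < L, reads slot s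
lemma wrap_facts (L : Nat) (m : Int) (s : Nat) (hs : (s:Int) = PySem.Int.mod m (L:Int))
    (h0 : 0 < L) (h1 : -(L:Int) ≤ m) (h2 : m < (L:Int)) :
    (0 ≤ m → m = (s:Int)) ∧ (m < 0 → (m + L).toNat = s) := by
  have hemod : PySem.Int.mod m (L:Int) = m % (L:Int) :=
    PySem.Int.mod_eq_emod_of_pos (by exact_mod_cast h0)
  constructor
  · intro hm
    have : m % (L:Int) = m := Int.emod_eq_of_lt hm h2
    omega
  · intro hm
    have hadd : m % (L:Int) = (m + L) % (L:Int) := (Int.add_mul_emod_self_left (a := m) (b := (L:Int)) (c := 1)).symm.trans (by ring_nf)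
    have : m % (L:Int) = m + L := by
      rw [hadd]
      exact Int.emod_eq_of_lt (by omega) (by omega)
    omega

lemma wrap_get {α : Type} (xs : List α) (d : α) (m : Int) (s : Nat)
    (hs : (s:Int) = PySem.Int.mod m ((xs.length:Int)))
    (h0 : 0 < xs.length) (h1 : -(xs.length:Int) ≤ m) (h2 : m < (xs.length:Int)) :
    PySem.List.pyGet? xs m = some (xs.getD s d) := by
  have hsl : s < xs.length := by
    have := PySem.Int.mod_lt (a := m) (b := (xs.length:Int)) (by exact_mod_cast h0)
    omega
  obtain ⟨hpos, hneg⟩ := wrap_facts xs.length m s hs h0 h1 h2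
  by_cases hm : 0 ≤ m
  · rw [show m = ((s:Nat):Int) from hpos hm, PySem.List.pyGet?_natCast,
      List.getElem?_eq_getElem hsl, getD_eq_getElem' xs s d hsl]
  · rw [pyGet?_wrapneg xs m h1 (by omega), hneg (by omega),
      List.getElem?_eq_getElem hsl, getD_eq_getElem' xs s d hsl]

lemma wrap_set {α : Type} (xs : List α) (v : α) (m : Int) (s : Nat)
    (hs : (s:Int) = PySem.Int.mod m ((xs.length:Int)))
    (h0 : 0 < xs.length) (h1 : -(xs.length:Int) ≤ m) (h2 : m < (xs.length:Int)) :
    PySem.List.pySetD xs m v = xs.set s v := by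
  obtain ⟨hpos, hneg⟩ := wrap_facts xs.length m s hs h0 h1 h2
  by_cases hm : 0 ≤ m
  · rw [show m = ((s:Nat):Int) from hpos hm, PySem.List.pySetD_natCast]
  · rw [pySetD_wrapneg xs m v h1 (by omega), hneg (by omega)]

-- the simulation invariant between A's state and B's state
def SimInv (board : List (List Int)) (sa : Int × List (List Int) × List Int)
    (sb : Int × List Int × List Int) : Prop :=
  sa.1 = sb.1 ∧ sa.2.2 = sb.2.2 ∧
  sa.2.1.length = board.length + 1 ∧ sb.2.1.length = board.length + 1 ∧
  sa.2.1.getD 0 [] = [] ∧ sb.2.1.getD 0 0 = 0 ∧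
  ∀ c : Nat, c < board.length → ∃ t : Nat, t ≤ board.length ∧
    sb.2.1.getD (c+1) 0 = (t : Int) ∧ sa.2.1.getD (c+1) [] = (colNZ (colL board c) t).reverse

lemma bCols_length (board : List (List Int)) : (bCols board).length = board.length + 1 := by
  simp [bCols]

lemma bCols_getD_zero (board : List (List Int)) : (bCols board).getD 0 [] = [] := rfl

lemma bCols_getD_succ (board : List (List Int)) (c : Nat) (hc : c < board.length) :
    (bCols board).getD (c+1) [] = colL board c := by
  simp only [bCols, List.getD_cons_succ]
  rw [List.getD_eq_getElem?_getD]
  simp only [List.getElem?_map, List.getElem?_range hc, Option.map_some, Option.getD_some]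
  exact bCols_col board c

lemma step_inv (board : List (List Int))
    (sa : Int × List (List Int) × List Int) (sb : Int × List Int × List Int)
    (h : SimInv board sa sb) (m : Int) (hm1 : -((board.length : Int)+1) ≤ m)
    (hm2 : m ≤ (board.length : Int)) :
    SimInv board (aStep sa m) (bStep (bCols board) sb m) := by
  obtain ⟨hans, hbask, hlenA, hlenB, hA0, hB0, hcols⟩ := h
  have hn1 : (0:Int) < (board.length:Int) + 1 := by omega
  obtain ⟨s, hs⟩ : ∃ s : Nat, (s:Int) = PySem.Int.mod m ((board.length:Int)+1) :=
    ⟨(PySem.Int.mod m ((board.length:Int)+1)).toNat,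
      Int.toNat_of_nonneg (PySem.Int.mod_nonneg (a := m) hn1)⟩
  have hsn : s ≤ board.length := by
    have := PySem.Int.mod_lt (a := m) (b := (board.length:Int)+1) hn1
    omega
  have hlA : (sa.2.1.length : Int) = (board.length:Int) + 1 := by rw [hlenA]; push_cast; ring
  have hlB : (sb.2.1.length : Int) = (board.length:Int) + 1 := by rw [hlenB]; push_cast; ring
  have hlC : (((bCols board).length) : Int) = (board.length:Int) + 1 := by
    rw [bCols_length]; push_cast; ring
  have hgetA : PySem.List.pyGet? sa.2.1 m = some (sa.2.1.getD s []) :=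
    wrap_get sa.2.1 [] m s (by rw [hlA]; exact hs) (by omega) (by omega) (by omega)
  have hgetB : PySem.List.pyGet? sb.2.1 m = some (sb.2.1.getD s 0) :=
    wrap_get sb.2.1 0 m s (by rw [hlB]; exact hs) (by omega) (by omega) (by omega)
  have hgetC : PySem.List.pyGet? (bCols board) m = some ((bCols board).getD s []) :=
    wrap_get (bCols board) [] m s (by rw [hlC]; exact hs) (by rw [bCols_length]; omega)
      (by omega) (by omega)
  have hsetA : ∀ v, PySem.List.pySetD sa.2.1 m v = sa.2.1.set s v := fun v =>
    wrap_set sa.2.1 v m s (by rw [hlA]; exact hs) (by omega) (by omega) (by omega)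
  have hsetB : ∀ v, PySem.List.pySetD sb.2.1 m v = sb.2.1.set s v := fun v =>
    wrap_set sb.2.1 v m s (by rw [hlB]; exact hs) (by omega) (by omega) (by omega)
  rcases Nat.eq_zero_or_eq_succ_pred s with hs0 | hs1
  · -- slot 0: A's stack and B's dummy column are both empty; both moves are no-ops
    subst hs0
    simp only [aStep, bStep, hgetA, hgetB, hgetC, Option.getD_some, hA0, hB0,
      bCols_getD_zero]
    rw [show bScan ([] : List Int) (0:Int) ([] : List Int).length = (0:Int) from rfl]
    rw [if_neg (by simp), if_neg (by simp)]
    refine ⟨hans, hbask, hlenA, ?_, hA0, ?_, ?_⟩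
    · rw [hsetB]; simpa using hlenB
    · rw [hsetB]
      exact getD_set_self sb.2.1 0 _ 0 (by omega)
    · intro c' hc'
      obtain ⟨t', ht', htop', hslot'⟩ := hcols c' hc'
      refine ⟨t', ht', ?_, hslot'⟩
      rw [hsetB, getD_set_ne sb.2.1 0 (c'+1) _ 0 (by omega)]
      exact htop'
  · obtain ⟨c, hsc⟩ : ∃ c : Nat, s = c + 1 := ⟨s.pred, hs1⟩
    subst hsc
    have hcn : c < board.length := by omega
    obtain ⟨t, ht, htop, hslot⟩ := hcols c hcn
    have hcolc : (bCols board).getD (c+1) [] = colL board c := bCols_getD_succ board c hcn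
    have hLlen : (colL board c).length = board.length := colL_length board c
    have hscan := scan_spec (colL board c) (colL board c).length t (by omega) (by omega)
    simp only [aStep, bStep, hgetA, hgetB, hgetC, Option.getD_some, hslot, htop, hcolc]
    cases hcol : colNZ (colL board c) t with
    | nil =>
        rw [hscan.1 hcol, hLlen]
        rw [if_neg (by simp), if_neg (lt_irrefl _)]
        refine ⟨hans, hbask, hlenA, ?_, hA0, ?_, ?_⟩
        · rw [hsetB]; simpa using hlenB
        · rw [hsetB, getD_set_ne sb.2.1 (c+1) 0 _ 0 (by omega)]
          exact hB0
        · intro c' hc'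
          by_cases hcc : c' = c
          · subst hcc
            refine ⟨board.length, le_rfl, ?_, ?_⟩
            · rw [hsetB]
              exact getD_set_self sb.2.1 (c'+1) _ 0 (by omega)
            · rw [hslot, hcol, colNZ_of_ge (colL board c') board.length (by omega)]
          · obtain ⟨t', ht', htop', hslot'⟩ := hcols c' hc'
            refine ⟨t', ht', ?_, hslot'⟩
            rw [hsetB, getD_set_ne sb.2.1 (c+1) (c'+1) _ 0 (by omega)]
            exact htop'
    | cons d rest =>
        obtain ⟨r', hr'n, hbsc, hcell, hrest⟩ := hscan.2 d rest hcol
        have hr'b : r' < board.length := by omega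
        rw [hbsc, hLlen]
        have hrlt : ((r':Nat):Int) < ((board.length:Nat):Int) := by exact_mod_cast hr'b
        have hdoll : (PySem.List.pyGet? (colL board c) ((r':Nat):Int)).getD 0 = d := by
          rw [pyGetD0, hcell]
        rw [if_pos hrlt, hdoll]
        have hlastA : PySem.List.pyGet? ((d :: rest).reverse) (-1) = some d := by
          rw [PySem.List.pyGet?_neg_one]
          simp
        have hlenstk : ((d :: rest).reverse).length ≠ 0 := by simp
        have hstkA : PySem.List.pySetD sa.2.1 m ((d :: rest).reverse.dropLast)
            = sa.2.1.set (c+1) rest.reverse := by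
          rw [hsetA, List.reverse_cons, List.dropLast_concat]
        have hstkB : PySem.List.pySetD sb.2.1 m (((r':Nat):Int) + 1)
            = sb.2.1.set (c+1) (((r'+1 : Nat)):Int) := by
          rw [hsetB]
          norm_num
        have hcols' : ∀ c' : Nat, c' < board.length → ∃ t' : Nat, t' ≤ board.length ∧
            (sb.2.1.set (c+1) (((r'+1 : Nat)):Int)).getD (c'+1) 0 = (t' : Int) ∧
            (sa.2.1.set (c+1) rest.reverse).getD (c'+1) [] = (colNZ (colL board c') t').reverse := by
          intro c' hc'
          by_cases hcc : c' = c
          · subst hcc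
            refine ⟨r'+1, by omega, ?_, ?_⟩
            · exact getD_set_self sb.2.1 (c'+1) _ 0 (by omega)
            · rw [getD_set_self sa.2.1 (c'+1) _ [] (by omega), hrest]
          · obtain ⟨t', ht', htop', hslot'⟩ := hcols c' hc'
            refine ⟨t', ht', ?_, ?_⟩
            · rw [getD_set_ne sb.2.1 (c+1) (c'+1) _ 0 (by omega)]
              exact htop'
            · rw [getD_set_ne sa.2.1 (c+1) (c'+1) _ [] (by omega)]
              exact hslot'
        have hlen1 : (sa.2.1.set (c+1) rest.reverse).length = board.length + 1 := by
          simpa using hlenA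
        have hlen2 : (sb.2.1.set (c+1) (((r'+1 : Nat)):Int)).length = board.length + 1 := by
          simpa using hlenB
        have hz1 : (sa.2.1.set (c+1) rest.reverse).getD 0 [] = [] := by
          rw [getD_set_ne sa.2.1 (c+1) 0 _ [] (by omega)]
          exact hA0
        have hz2 : (sb.2.1.set (c+1) (((r'+1 : Nat)):Int)).getD 0 0 = 0 := by
          rw [getD_set_ne sb.2.1 (c+1) 0 _ 0 (by omega)]
          exact hB0
        rw [if_pos hlenstk, hlastA, ← hbask]
        by_cases hcond : sa.2.2.length ≠ 0 ∧ PySem.List.pyGet? sa.2.2 (-1) = some d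
        · rw [if_pos hcond, if_pos hcond, hstkA, hstkB]
          exact ⟨by rw [hans], rfl, hlen1, hlen2, hz1, hz2, hcols'⟩
        · rw [if_neg hcond, if_neg hcond, hstkA, hstkB]
          exact ⟨hans, rfl, hlen1, hlen2, hz1, hz2, hcols'⟩

lemma fold_inv (board : List (List Int)) :
    ∀ (moves : List Int) sa sb, SimInv board sa sb →
      (∀ m ∈ moves, -((board.length : Int)+1) ≤ m ∧ m ≤ (board.length : Int)) →
      SimInv board (moves.foldl aStep sa) (moves.foldl (bStep (bCols board)) sb) := by
  intro moves
  induction moves with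
  | nil => intro sa sb h _; exact h
  | cons m ms ih =>
      intro sa sb h hb
      simp only [List.foldl_cons]
      exact ih _ _ (step_inv board sa sb h m (hb m (by simp)).1 (hb m (by simp)).2)
        (fun x hx => hb x (by simp [hx]))

lemma init_inv (board : List (List Int)) :
    SimInv board (0, buildStacks board, [])
      (0, List.replicate (board.length + 1) (0:Int), []) := by
  refine ⟨rfl, rfl, ?_, by simp, ?_, ?_, ?_⟩
  · rw [buildStacks_eq]; simp
  · rw [buildStacks_eq]; rfl
  · rw [List.getD_eq_getElem?_getD, List.getElem?_replicate, if_pos (by omega)]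
    rfl
  · intro c hc
    refine ⟨0, Nat.zero_le _, ?_, ?_⟩
    · rw [List.getD_eq_getElem?_getD, List.getElem?_replicate, if_pos (by omega)]
      rfl
    · rw [buildStacks_eq]
      simp only [List.getD_cons_succ]
      rw [List.getD_eq_getElem?_getD]
      simp [List.getElem?_map, List.getElem?_range hc]

-- ===== VERDICT (by name: the statement is the Claim_ definition above) =====
theorem solution_spec : Claim_equal_solution := by
  intro board moves _ hpre
  unfold Spec_solution solution solution_alt
  exact (fold_inv board moves _ _ (init_inv board) hpre.2).1
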